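-- pv_equiv track=rewrite | github.com/uvsq22104773/TER_jeu-isolation | Algorithmes.py | filter_edges
-- ===== SOURCE A (Python) =====
-- def get_descendants(graph, start, visited=None):
--     if visited is None:
--         visited = set()
--     for neighbor in graph.get(start, []):
--         if neighbor not in visited:
--             visited.add(neighbor)
--             get_descendants(graph, neighbor, visited)
--     return visited
--
-- def filter_edges(graph, edges_to_remove):
--     # Trouver tous les descendants des arêtes à supprimer
--     nodes_to_exclude = set()
--     for src, dst in edges_to_remove:
--         nodes_to_exclude.add(dst)
--         descendants = get_descendants(graph, dst)
--         nodes_to_exclude.update(descendants)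
--
--     # Construire la liste finale des arêtes
--     remaining_edges = []
--     for src, neighbors in graph.items():
--         for dst in neighbors:
--             if src in nodes_to_exclude or dst in nodes_to_exclude:
--                 continue
--             remaining_edges.append((src, dst))
--     return remaining_edges
-- ===== SOURCE B (Python) =====
-- def filter_edges(graph, edges_to_remove):
--     # One multi-source iterative DFS from all removed-edge destinations,
--     # instead of a separate recursive traversal per removed edge (a single pass over the graph).
--     excluded = set()
--     stack = [dst for _, dst in edges_to_remove]
--     while stack:
--         u = stack.pop()
--         if u not in excluded:
--             excluded.add(u)
--             stack.extend(graph.get(u, []))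
--     return [(src, dst) for src, neighbors in graph.items()
--             for dst in neighbors
--             if src not in excluded and dst not in excluded]
-- ===== Notes on version B (the rewrite author's own statement) =====
-- stated objective: alternative
-- what changed: replaces the per-removed-edge recursive DFS (one fresh traversal per removed edge) with a single multi-source iterative stack DFS that computes the exclusion set once, and builds the remaining-edge list with one flat comprehension
import Mathlib
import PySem

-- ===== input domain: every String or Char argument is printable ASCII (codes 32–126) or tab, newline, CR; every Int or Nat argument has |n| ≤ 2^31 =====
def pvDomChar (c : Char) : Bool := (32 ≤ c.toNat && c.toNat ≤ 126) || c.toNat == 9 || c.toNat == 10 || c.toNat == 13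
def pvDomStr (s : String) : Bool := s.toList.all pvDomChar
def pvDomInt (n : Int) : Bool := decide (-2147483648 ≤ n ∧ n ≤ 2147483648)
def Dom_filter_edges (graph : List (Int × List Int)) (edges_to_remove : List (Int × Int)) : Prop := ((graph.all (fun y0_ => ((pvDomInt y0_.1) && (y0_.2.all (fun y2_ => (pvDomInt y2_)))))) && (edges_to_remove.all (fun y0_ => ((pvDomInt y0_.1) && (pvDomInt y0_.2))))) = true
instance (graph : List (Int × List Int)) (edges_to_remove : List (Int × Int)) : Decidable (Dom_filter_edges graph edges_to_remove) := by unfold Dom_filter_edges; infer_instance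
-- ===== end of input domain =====

-- B replaces A's per-removed-edge recursive DFS with one multi-source iterative stack DFS
-- computing the exclusion set once (objective: alternative).

-- ===== PORT A =====
-- shared helper: the list of all neighbour entries of the dict (used only to size the fuel bounds)
def pvUniv (d : PySem.Dict Int (List Int)) : List Int := d.values.flatten

-- get_descendants' loop: recursive DFS over the neighbour list with a shared visited set.
-- The Nat argument is a fuel bound on recursion DEPTH only (a totality guard): each descent adds a
-- fresh member of pvUniv to visited, so the fuel filter_edges supplies is never exhausted (proved below).
def gdLoop (d : PySem.Dict Int (List Int)) : Nat → List Int → PySem.Set Int → PySem.Set Int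
  | _, [], visited => visited
  | fuel, n :: rest, visited =>
    if visited.contains n then gdLoop d fuel rest visited
    else
      match fuel with
      | 0 => gdLoop d 0 rest (visited.add n)
      | f+1 => gdLoop d (f+1) rest (gdLoop d f (d.getD n []) (visited.add n))
termination_by fuel pending _ => (fuel, pending.length)

def pyGetDescendants (d : PySem.Dict Int (List Int)) (start : Int) : PySem.Set Int :=
  gdLoop d ((pvUniv d).length + 1) (d.getD start []) PySem.Set.empty

def filter_edges (graph : List (Int × List Int)) (edges_to_remove : List (Int × Int)) : List (Int × Int) :=
  let d := PySem.Dict.ofList graph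
  let nodesToExclude := edges_to_remove.foldl
    (fun s e => PySem.Set.update (PySem.Set.add s e.2) (pyGetDescendants d e.2)) PySem.Set.empty
  d.items.foldl (fun acc p =>
    p.2.foldl (fun acc2 dst =>
      if nodesToExclude.contains p.1 || nodesToExclude.contains dst then acc2
      else acc2 ++ [(p.1, dst)]) acc) []

-- ===== PORT B =====
-- B: one multi-source iterative DFS; stack held top-first, so Python's pop() + extend(nbrs)
-- is "push nbrs reversed at the head". Fuel bounds the number of loop iterations (totality
-- guard only; the fuel filter_edges_alt supplies is never exhausted, proved below).
def bfsLoop (d : PySem.Dict Int (List Int)) : Nat → List Int → PySem.Set Int → PySem.Set Int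
  | _, [], visited => visited
  | 0, _ :: _, visited => visited
  | f+1, u :: rest, visited =>
    if visited.contains u then bfsLoop d f rest visited
    else bfsLoop d f ((d.getD u []).reverse ++ rest) (visited.add u)

def bfsFuel (d : PySem.Dict Int (List Int)) (edges : List (Int × Int)) : Nat :=
  edges.length + ((pvUniv d).length + edges.length + 1) * ((pvUniv d).length + 1)

def filter_edges_alt (graph : List (Int × List Int)) (edges_to_remove : List (Int × Int)) : List (Int × Int) :=
  let d := PySem.Dict.ofList graph
  let excluded := bfsLoop d (bfsFuel d edges_to_remove) ((edges_to_remove.map Prod.snd).reverse) PySem.Set.empty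
  d.items.flatMap (fun p =>
    (p.2.filter (fun t => !(excluded.contains p.1) && !(excluded.contains t))).map (fun t => (p.1, t)))

-- ===== PRECONDITION & SPEC =====
def Spec_filter_edges (graph : List (Int × List Int)) (edges_to_remove : List (Int × Int)) (out : List (Int × Int)) : Prop := out = filter_edges_alt graph edges_to_remove
instance (graph : List (Int × List Int)) (edges_to_remove : List (Int × Int)) (out : List (Int × Int)) : Decidable (Spec_filter_edges graph edges_to_remove out) := by unfold Spec_filter_edges; infer_instance

-- ===== CLAIM (what is proved, stated in full; the proofs are below) =====
def Claim_equal_filter_edges : Prop := ∀ (graph : List (Int × List Int)) (edges_to_remove : List (Int × Int)), Dom_filter_edges graph edges_to_remove → Spec_filter_edges graph edges_to_remove (filter_edges graph edges_to_remove)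

-- ===== LEMMAS AND PROOFS =====

def pvReach (d : PySem.Dict Int (List Int)) (u x : Int) : Prop :=
  Relation.ReflTransGen (fun a b => b ∈ d.getD a []) u x

def pvU (d : PySem.Dict Int (List Int)) : PySem.Set Int := PySem.Set.ofList (pvUniv d)

theorem pv_mem_univ_getD (d : PySem.Dict Int (List Int)) (u x : Int)
    (h : x ∈ d.getD u []) : x ∈ pvUniv d := by
  rw [PySem.Dict.getD_eq_get?_getD] at h
  rcases hg : d.get? u with _ | l
  · rw [hg] at h; simp at h
  · have hi : (u, l) ∈ d.items := PySem.Dict.mem_items_of_get?_eq_some _ hg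
    have hv : l ∈ d.values := by simp only [PySem.Dict.values]; exact List.mem_map_of_mem hi
    rw [hg] at h
    exact List.mem_flatten.mpr ⟨l, hv, h⟩

theorem pv_getD_len (d : PySem.Dict Int (List Int)) (u : Int) :
    (d.getD u []).length ≤ (pvUniv d).length := by
  rw [PySem.Dict.getD_eq_get?_getD]
  rcases hg : d.get? u with _ | l
  · simp
  · have hi : (u, l) ∈ d.items := PySem.Dict.mem_items_of_get?_eq_some _ hg
    have hv : l ∈ d.values := by simp only [PySem.Dict.values]; exact List.mem_map_of_mem hi
    rw [pvUniv, List.length_flatten]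
    exact List.le_sum_of_mem (List.mem_map_of_mem hv)

theorem pv_diff_le (U V W : List Int) (hU : U.Nodup) (hVW : ∀ x, x ∈ V → x ∈ W) :
    (PySem.Set.diff U W).length ≤ (PySem.Set.diff U V).length := by
  refine (List.Nodup.subperm (PySem.Set.nodup_diff _ _ hU) ?_).length_le
  intro x hx
  rw [PySem.Set.mem_diff] at hx ⊢
  exact ⟨hx.1, fun h => hx.2 (hVW x h)⟩

theorem pv_diff_le_self (U V : List Int) (hU : U.Nodup) :
    (PySem.Set.diff U V).length ≤ U.length := by
  refine (List.Nodup.subperm (PySem.Set.nodup_diff _ _ hU) ?_).length_le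
  intro x hx
  exact ((PySem.Set.mem_diff _ _ _).mp hx).1

theorem pv_diff_lt (U V : List Int) (n : Int) (hU : U.Nodup) (hn : n ∈ U) (hnV : n ∉ V) :
    (PySem.Set.diff U (PySem.Set.add V n)).length < (PySem.Set.diff U V).length := by
  have hmem : n ∈ PySem.Set.diff U V := by rw [PySem.Set.mem_diff]; exact ⟨hn, hnV⟩
  have hsub : List.Subperm (PySem.Set.diff U (PySem.Set.add V n)) ((PySem.Set.diff U V).erase n) := by
    refine List.Nodup.subperm (PySem.Set.nodup_diff _ _ hU) ?_
    intro x hx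
    rw [PySem.Set.mem_diff] at hx
    have hxn : x ≠ n := fun he => hx.2 (by rw [PySem.Set.mem_add]; exact Or.inr he)
    rw [List.mem_erase_of_ne hxn, PySem.Set.mem_diff]
    exact ⟨hx.1, fun h => hx.2 (by rw [PySem.Set.mem_add]; exact Or.inl h)⟩
  have h1 := hsub.length_le
  rw [List.length_erase_of_mem hmem] at h1
  have hpos : 0 < (PySem.Set.diff U V).length := List.length_pos_of_mem hmem
  omega

-- unfolding equations
theorem gdLoop_cons_mem (d : PySem.Dict Int (List Int)) (f : Nat) (n : Int) (rest : List Int)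
    (V : PySem.Set Int) (hc : V.contains n = true) :
    gdLoop d f (n :: rest) V = gdLoop d f rest V := by
  cases f <;> · rw [gdLoop]; rw [if_pos hc]

theorem gdLoop_cons_zero (d : PySem.Dict Int (List Int)) (n : Int) (rest : List Int)
    (V : PySem.Set Int) (hc : ¬ V.contains n = true) :
    gdLoop d 0 (n :: rest) V = gdLoop d 0 rest (V.add n) := by
  rw [gdLoop]; rw [if_neg hc]

theorem gdLoop_cons_succ (d : PySem.Dict Int (List Int)) (f : Nat) (n : Int) (rest : List Int)
    (V : PySem.Set Int) (hc : ¬ V.contains n = true) :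
    gdLoop d (f + 1) (n :: rest) V
      = gdLoop d (f + 1) rest (gdLoop d f (d.getD n []) (V.add n)) := by
  rw [gdLoop]; rw [if_neg hc]

theorem gdLoop_nil (d : PySem.Dict Int (List Int)) (f : Nat) (V : PySem.Set Int) :
    gdLoop d f [] V = V := by rw [gdLoop]

theorem gdLoop_mono (d : PySem.Dict Int (List Int)) (f : Nat) (p : List Int)
    (V : PySem.Set Int) : ∀ x ∈ V, x ∈ gdLoop d f p V := by
  induction f, p, V using gdLoop.induct d with
  | case1 f V => rw [gdLoop_nil]; exact fun x hx => hx
  | case2 fuel n rest V hc ih =>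
      rw [gdLoop_cons_mem d fuel n rest V hc]; exact ih
  | case3 n rest V hc ih =>
      rw [gdLoop_cons_zero d n rest V hc]
      exact fun x hx => ih x (by rw [PySem.Set.mem_add]; exact Or.inl hx)
  | case4 n rest V hc f ih1 ih2 =>
      rw [gdLoop_cons_succ d f n rest V hc]
      exact fun x hx => ih2 x (ih1 x (by rw [PySem.Set.mem_add]; exact Or.inl hx))

theorem gdLoop_pending (d : PySem.Dict Int (List Int)) (f : Nat) (p : List Int)
    (V : PySem.Set Int) : ∀ x ∈ p, x ∈ gdLoop d f p V := by
  induction f, p, V using gdLoop.induct d with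
  | case1 f V => intro x hx; simp at hx
  | case2 fuel n rest V hc ih =>
      rw [gdLoop_cons_mem d fuel n rest V hc]
      intro x hx
      rcases List.mem_cons.mp hx with rfl | hx
      · exact gdLoop_mono _ _ _ _ _ (by rw [← PySem.Set.contains_iff]; exact hc)
      · exact ih x hx
  | case3 n rest V hc ih =>
      rw [gdLoop_cons_zero d n rest V hc]
      intro x hx
      rcases List.mem_cons.mp hx with rfl | hx
      · exact gdLoop_mono _ _ _ _ _ (by rw [PySem.Set.mem_add]; exact Or.inr rfl)
      · exact ih x hx
  | case4 n rest V hc f ih1 ih2 =>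
      rw [gdLoop_cons_succ d f n rest V hc]
      intro x hx
      rcases List.mem_cons.mp hx with rfl | hx
      · exact gdLoop_mono _ _ _ _ _
          (gdLoop_mono d f (d.getD x []) (V.add x) x (by rw [PySem.Set.mem_add]; exact Or.inr rfl))
      · exact ih2 x hx

theorem gdLoop_sound (d : PySem.Dict Int (List Int)) (f : Nat) (p : List Int)
    (V : PySem.Set Int) : ∀ x ∈ gdLoop d f p V, x ∈ V ∨ ∃ n ∈ p, pvReach d n x := by
  induction f, p, V using gdLoop.induct d with
  | case1 f V => rw [gdLoop_nil]; exact fun x hx => Or.inl hx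
  | case2 fuel n rest V hc ih =>
      rw [gdLoop_cons_mem d fuel n rest V hc]
      intro x hx
      rcases ih x hx with h | ⟨m, hm, hr⟩
      · exact Or.inl h
      · exact Or.inr ⟨m, List.mem_cons_of_mem _ hm, hr⟩
  | case3 n rest V hc ih =>
      rw [gdLoop_cons_zero d n rest V hc]
      intro x hx
      rcases ih x hx with h | ⟨m, hm, hr⟩
      · rcases (PySem.Set.mem_add _ _ _).mp h with h | rfl
        · exact Or.inl h
        · exact Or.inr ⟨x, List.mem_cons_self, Relation.ReflTransGen.refl⟩
      · exact Or.inr ⟨m, List.mem_cons_of_mem _ hm, hr⟩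
  | case4 n rest V hc f ih1 ih2 =>
      rw [gdLoop_cons_succ d f n rest V hc]
      intro x hx
      rcases ih2 x hx with h | ⟨m, hm, hr⟩
      · rcases ih1 x h with h2 | ⟨m, hm, hr⟩
        · rcases (PySem.Set.mem_add _ _ _).mp h2 with h3 | rfl
          · exact Or.inl h3
          · exact Or.inr ⟨x, List.mem_cons_self, Relation.ReflTransGen.refl⟩
        · exact Or.inr ⟨n, List.mem_cons_self, Relation.ReflTransGen.head hm hr⟩
      · exact Or.inr ⟨m, List.mem_cons_of_mem _ hm, hr⟩

theorem gdLoop_closed (d : PySem.Dict Int (List Int)) (f : Nat) (p : List Int)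
    (V : PySem.Set Int) :
    (∀ m ∈ p, m ∈ pvUniv d) → ((pvU d).diff V).length < f →
    ∀ x ∈ gdLoop d f p V, x ∈ V ∨ ∀ y ∈ d.getD x [], y ∈ gdLoop d f p V := by
  induction f, p, V using gdLoop.induct d with
  | case1 f V => rw [gdLoop_nil]; exact fun _ _ x hx => Or.inl hx
  | case2 fuel n rest V hc ih =>
      rw [gdLoop_cons_mem d fuel n rest V hc]
      intro hU hf
      exact ih (fun m hm => hU m (List.mem_cons_of_mem _ hm)) hf
  | case3 n rest V hc ih =>
      intro hU hf
      exact absurd hf (Nat.not_lt_zero _)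
  | case4 n rest V hc f ih1 ih2 =>
      rw [gdLoop_cons_succ d f n rest V hc]
      intro hU hf
      have hnU : n ∈ pvU d := by
        rw [pvU, PySem.Set.mem_ofList]; exact hU n List.mem_cons_self
      have hnV : n ∉ V := fun h => hc (by rw [PySem.Set.contains_iff]; exact h)
      have hnodup : (pvU d).Nodup := PySem.Set.nodup_ofList _
      have hlt := pv_diff_lt (pvU d) V n hnodup hnU hnV
      have hf1 : ((pvU d).diff (V.add n)).length < f := by omega
      have hfM : ((pvU d).diff (gdLoop d f (d.getD n []) (V.add n))).length < f + 1 := by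
        have hle := pv_diff_le (pvU d) (V.add n) (gdLoop d f (d.getD n []) (V.add n)) hnodup
          (gdLoop_mono d f (d.getD n []) (V.add n))
        omega
      have hU1 : ∀ m ∈ d.getD n [], m ∈ pvUniv d := fun m hm => pv_mem_univ_getD d n m hm
      intro x hx
      rcases ih2 (fun m hm => hU m (List.mem_cons_of_mem _ hm)) hfM x hx with h | hcl
      · rcases ih1 hU1 hf1 x h with h2 | hcl
        · rcases (PySem.Set.mem_add _ _ _).mp h2 with h3 | rfl
          · exact Or.inl h3
          · refine Or.inr fun y hy => ?_
            exact gdLoop_mono _ _ _ _ _ (gdLoop_pending d f (d.getD x []) (V.add x) y hy)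
        · refine Or.inr fun y hy => ?_
          exact gdLoop_mono _ _ _ _ _ (hcl y hy)
      · exact Or.inr hcl

theorem gdLoop_complete (d : PySem.Dict Int (List Int)) (f : Nat) (p : List Int)
    (hU : ∀ m ∈ p, m ∈ pvUniv d) (hf : ((pvU d).diff PySem.Set.empty).length < f)
    (n x : Int) (hn : n ∈ p) (hr : pvReach d n x) :
    x ∈ gdLoop d f p PySem.Set.empty := by
  induction hr with
  | refl => exact gdLoop_pending d f p _ n hn
  | tail hab hbc ih =>
      rcases gdLoop_closed d f p PySem.Set.empty hU hf _ ih with h | hcl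
      · simp [PySem.Set.empty] at h
      · exact hcl _ hbc

theorem mem_pyGetDescendants (d : PySem.Dict Int (List Int)) (s x : Int) :
    x ∈ pyGetDescendants d s ↔ ∃ n ∈ d.getD s [], pvReach d n x := by
  have hU : ∀ m ∈ d.getD s [], m ∈ pvUniv d := fun m hm => pv_mem_univ_getD d s m hm
  have hf : ((pvU d).diff PySem.Set.empty).length < (pvUniv d).length + 1 := by
    have h1 := pv_diff_le_self (pvU d) PySem.Set.empty (PySem.Set.nodup_ofList _)
    have h2 : (pvU d).length ≤ (pvUniv d).length := by
      rw [pvU]; exact PySem.Set.length_ofList_le (pvUniv d)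
    omega
  constructor
  · intro hx
    rcases gdLoop_sound d _ _ _ x hx with h | hex
    · simp [PySem.Set.empty] at h
    · exact hex
  · rintro ⟨n, hn, hr⟩
    exact gdLoop_complete d _ _ hU hf n x hn hr

theorem pv_reach_head_iff (d : PySem.Dict Int (List Int)) (u x : Int) :
    pvReach d u x ↔ x = u ∨ ∃ n ∈ d.getD u [], pvReach d n x := by
  constructor
  · intro h
    rcases Relation.ReflTransGen.cases_head h with rfl | ⟨b, hb, hr⟩
    · exact Or.inl rfl
    · exact Or.inr ⟨b, hb, hr⟩
  · rintro (rfl | ⟨n, hn, hr⟩)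
    · exact Relation.ReflTransGen.refl
    · exact Relation.ReflTransGen.head hn hr

theorem pv_mem_foldA (d : PySem.Dict Int (List Int)) (es : List (Int × Int)) :
    ∀ (S0 : PySem.Set Int) (x : Int),
    (x ∈ es.foldl (fun s e => PySem.Set.update (PySem.Set.add s e.2) (pyGetDescendants d e.2)) S0)
      ↔ x ∈ S0 ∨ ∃ e ∈ es, pvReach d e.2 x := by
  induction es with
  | nil => intro S0 x; simp
  | cons e rest ih =>
      intro S0 x
      rw [List.foldl_cons, ih]
      rw [PySem.Set.mem_update, PySem.Set.mem_add, mem_pyGetDescendants]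
      constructor
      · rintro (((h | rfl) | ⟨n, hn, hr⟩) | ⟨e', he', hr⟩)
        · exact Or.inl h
        · exact Or.inr ⟨e, List.mem_cons_self, Relation.ReflTransGen.refl⟩
        · exact Or.inr ⟨e, List.mem_cons_self, Relation.ReflTransGen.head hn hr⟩
        · exact Or.inr ⟨e', List.mem_cons_of_mem _ he', hr⟩
      · rintro (h | ⟨e', he', hr⟩)
        · exact Or.inl (Or.inl (Or.inl h))
        · rcases List.mem_cons.mp he' with rfl | he'
          · rcases (pv_reach_head_iff d e'.2 x).mp hr with rfl | ⟨n, hn, hr2⟩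
            · exact Or.inl (Or.inl (Or.inr rfl))
            · exact Or.inl (Or.inr ⟨n, hn, hr2⟩)
          · exact Or.inr ⟨e', he', hr⟩

theorem bfsLoop_nil (d : PySem.Dict Int (List Int)) (f : Nat) (V : PySem.Set Int) :
    bfsLoop d f [] V = V := by cases f <;> rw [bfsLoop]

theorem bfsLoop_cons_mem (d : PySem.Dict Int (List Int)) (f : Nat) (u : Int) (rest : List Int)
    (V : PySem.Set Int) (hc : V.contains u = true) :
    bfsLoop d (f + 1) (u :: rest) V = bfsLoop d f rest V := by
  rw [bfsLoop]; rw [if_pos hc]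

theorem bfsLoop_cons_new (d : PySem.Dict Int (List Int)) (f : Nat) (u : Int) (rest : List Int)
    (V : PySem.Set Int) (hc : ¬ V.contains u = true) :
    bfsLoop d (f + 1) (u :: rest) V
      = bfsLoop d f ((d.getD u []).reverse ++ rest) (V.add u) := by
  rw [bfsLoop]; rw [if_neg hc]

theorem bfsLoop_mono (d : PySem.Dict Int (List Int)) (f : Nat) (st : List Int)
    (V : PySem.Set Int) : ∀ x ∈ V, x ∈ bfsLoop d f st V := by
  induction f, st, V using bfsLoop.induct d with
  | case1 f V => rw [bfsLoop_nil]; exact fun x hx => hx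
  | case2 u rest V => rw [bfsLoop]; exact fun x hx => hx
  | case3 f u rest V hc ih => rw [bfsLoop_cons_mem d f u rest V hc]; exact ih
  | case4 f u rest V hc ih =>
      rw [bfsLoop_cons_new d f u rest V hc]
      exact fun x hx => ih x (by rw [PySem.Set.mem_add]; exact Or.inl hx)

theorem bfsLoop_sound (d : PySem.Dict Int (List Int)) (f : Nat) (st : List Int)
    (V : PySem.Set Int) : ∀ x ∈ bfsLoop d f st V, x ∈ V ∨ ∃ u ∈ st, pvReach d u x := by
  induction f, st, V using bfsLoop.induct d with
  | case1 f V => rw [bfsLoop_nil]; exact fun x hx => Or.inl hx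
  | case2 u rest V => rw [bfsLoop]; exact fun x hx => Or.inl hx
  | case3 f u rest V hc ih =>
      rw [bfsLoop_cons_mem d f u rest V hc]
      intro x hx
      rcases ih x hx with h | ⟨m, hm, hr⟩
      · exact Or.inl h
      · exact Or.inr ⟨m, List.mem_cons_of_mem _ hm, hr⟩
  | case4 f u rest V hc ih =>
      rw [bfsLoop_cons_new d f u rest V hc]
      intro x hx
      rcases ih x hx with h | ⟨m, hm, hr⟩
      · rcases (PySem.Set.mem_add _ _ _).mp h with h2 | rfl
        · exact Or.inl h2
        · exact Or.inr ⟨x, List.mem_cons_self, Relation.ReflTransGen.refl⟩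
      · rcases List.mem_append.mp hm with hm | hm
        · exact Or.inr ⟨u, List.mem_cons_self,
            Relation.ReflTransGen.head (List.mem_reverse.mp hm) hr⟩
        · exact Or.inr ⟨m, List.mem_cons_of_mem _ hm, hr⟩

theorem bfsLoop_stack (d : PySem.Dict Int (List Int)) (f : Nat) (st : List Int)
    (V : PySem.Set Int) (W : PySem.Set Int) (hW : W.Nodup)
    (hWu : ∀ y ∈ pvUniv d, y ∈ W) :
    (∀ u ∈ st, u ∈ W) →
    st.length + (W.diff V).length * ((pvUniv d).length + 1) ≤ f →
    ∀ u ∈ st, u ∈ bfsLoop d f st V := by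
  induction f, st, V using bfsLoop.induct d with
  | case1 f V => intro _ _ u hu; simp at hu
  | case2 u rest V =>
      intro hst hf
      exfalso
      have : (u :: rest).length ≥ 1 := by simp
      omega
  | case3 f u rest V hc ih =>
      intro hst hf
      rw [bfsLoop_cons_mem d f u rest V hc]
      intro w hw
      rcases List.mem_cons.mp hw with rfl | hw
      · exact bfsLoop_mono _ _ _ _ _ (by rw [← PySem.Set.contains_iff]; exact hc)
      · refine ih (fun m hm => hst m (List.mem_cons_of_mem _ hm)) ?_ w hw
        simp only [List.length_cons] at hf
        omega
  | case4 f u rest V hc ih =>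
      intro hst hf
      rw [bfsLoop_cons_new d f u rest V hc]
      have harith : ((d.getD u []).reverse ++ rest).length
          + ((W.diff (V.add u)).length) * ((pvUniv d).length + 1) ≤ f := by
        have hnV : u ∉ V := fun h => hc (by rw [PySem.Set.contains_iff]; exact h)
        have hlt := pv_diff_lt W V u hW (hst u List.mem_cons_self) hnV
        have hnb : (d.getD u []).length ≤ (pvUniv d).length := pv_getD_len d u
        have hmul : ((W.diff (V.add u)).length + 1) * ((pvUniv d).length + 1)
            ≤ (W.diff V).length * ((pvUniv d).length + 1) :=
          Nat.mul_le_mul_right _ hlt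
        rw [Nat.succ_mul] at hmul
        simp only [List.length_append, List.length_reverse, List.length_cons] at hf ⊢
        omega
      have hst' : ∀ m ∈ (d.getD u []).reverse ++ rest, m ∈ W := by
        intro m hm
        rcases List.mem_append.mp hm with hm | hm
        · exact hWu m (pv_mem_univ_getD d u m (List.mem_reverse.mp hm))
        · exact hst m (List.mem_cons_of_mem _ hm)
      intro w hw
      rcases List.mem_cons.mp hw with rfl | hw
      · exact bfsLoop_mono _ _ _ _ _ (by rw [PySem.Set.mem_add]; exact Or.inr rfl)
      · exact ih hst' harith w (List.mem_append.mpr (Or.inr hw))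

theorem bfsLoop_closed (d : PySem.Dict Int (List Int)) (f : Nat) (st : List Int)
    (V : PySem.Set Int) (W : PySem.Set Int) (hW : W.Nodup)
    (hWu : ∀ y ∈ pvUniv d, y ∈ W) :
    (∀ u ∈ st, u ∈ W) →
    st.length + (W.diff V).length * ((pvUniv d).length + 1) ≤ f →
    ∀ x ∈ bfsLoop d f st V, x ∈ V ∨ ∀ y ∈ d.getD x [], y ∈ bfsLoop d f st V := by
  induction f, st, V using bfsLoop.induct d with
  | case1 f V => rw [bfsLoop_nil]; exact fun _ _ x hx => Or.inl hx
  | case2 u rest V =>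
      intro hst hf
      exfalso
      have : (u :: rest).length ≥ 1 := by simp
      omega
  | case3 f u rest V hc ih =>
      intro hst hf
      rw [bfsLoop_cons_mem d f u rest V hc]
      refine ih (fun m hm => hst m (List.mem_cons_of_mem _ hm)) ?_
      simp only [List.length_cons] at hf
      omega
  | case4 f u rest V hc ih =>
      intro hst hf
      rw [bfsLoop_cons_new d f u rest V hc]
      have harith : ((d.getD u []).reverse ++ rest).length
          + ((W.diff (V.add u)).length) * ((pvUniv d).length + 1) ≤ f := by
        have hnV : u ∉ V := fun h => hc (by rw [PySem.Set.contains_iff]; exact h)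
        have hlt := pv_diff_lt W V u hW (hst u List.mem_cons_self) hnV
        have hnb : (d.getD u []).length ≤ (pvUniv d).length := pv_getD_len d u
        have hmul : ((W.diff (V.add u)).length + 1) * ((pvUniv d).length + 1)
            ≤ (W.diff V).length * ((pvUniv d).length + 1) :=
          Nat.mul_le_mul_right _ hlt
        rw [Nat.succ_mul] at hmul
        simp only [List.length_append, List.length_reverse, List.length_cons] at hf ⊢
        omega
      have hst' : ∀ m ∈ (d.getD u []).reverse ++ rest, m ∈ W := by
        intro m hm
        rcases List.mem_append.mp hm with hm | hm
        · exact hWu m (pv_mem_univ_getD d u m (List.mem_reverse.mp hm))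
        · exact hst m (List.mem_cons_of_mem _ hm)
      intro x hx
      rcases ih hst' harith x hx with h | hcl
      · rcases (PySem.Set.mem_add _ _ _).mp h with h2 | rfl
        · exact Or.inl h2
        · refine Or.inr fun y hy => ?_
          exact bfsLoop_stack d f _ _ W hW hWu hst' harith y
            (List.mem_append.mpr (Or.inl (List.mem_reverse.mpr hy)))
      · exact Or.inr hcl

theorem bfsLoop_complete (d : PySem.Dict Int (List Int)) (f : Nat) (st : List Int)
    (W : PySem.Set Int) (hW : W.Nodup) (hWu : ∀ y ∈ pvUniv d, y ∈ W)
    (hst : ∀ u ∈ st, u ∈ W)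
    (hf : st.length + (W.diff PySem.Set.empty).length * ((pvUniv d).length + 1) ≤ f)
    (u x : Int) (hu : u ∈ st) (hr : pvReach d u x) :
    x ∈ bfsLoop d f st PySem.Set.empty := by
  induction hr with
  | refl => exact bfsLoop_stack d f st _ W hW hWu hst hf u hu
  | tail hab hbc ih =>
      rcases bfsLoop_closed d f st PySem.Set.empty W hW hWu hst hf _ ih with h | hcl
      · simp [PySem.Set.empty] at h
      · exact hcl _ hbc

theorem pv_mem_exB (d : PySem.Dict Int (List Int)) (es : List (Int × Int)) (x : Int) :
    x ∈ bfsLoop d (bfsFuel d es) ((es.map Prod.snd).reverse) PySem.Set.empty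
      ↔ ∃ e ∈ es, pvReach d e.2 x := by
  constructor
  · intro hx
    rcases bfsLoop_sound d _ _ _ x hx with h | ⟨u, hu, hr⟩
    · simp [PySem.Set.empty] at h
    · rcases List.mem_map.mp (List.mem_reverse.mp hu) with ⟨e, he, rfl⟩
      exact ⟨e, he, hr⟩
  · rintro ⟨e, he, hr⟩
    have hWnd : (PySem.Set.update (pvU d) (es.map Prod.snd)).Nodup :=
      PySem.Set.nodup_update _ _ (PySem.Set.nodup_ofList _)
    have hWu : ∀ y ∈ pvUniv d, y ∈ PySem.Set.update (pvU d) (es.map Prod.snd) := by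
      intro y hy
      rw [PySem.Set.mem_update]
      exact Or.inl (by rw [pvU, PySem.Set.mem_ofList]; exact hy)
    have hst : ∀ u ∈ (es.map Prod.snd).reverse, u ∈ PySem.Set.update (pvU d) (es.map Prod.snd) := by
      intro u hu
      rw [PySem.Set.mem_update]
      exact Or.inr (List.mem_reverse.mp hu)
    have hf : ((es.map Prod.snd).reverse).length
        + ((PySem.Set.update (pvU d) (es.map Prod.snd)).diff PySem.Set.empty).length
          * ((pvUniv d).length + 1) ≤ bfsFuel d es := by
      have hd1 : ((PySem.Set.update (pvU d) (es.map Prod.snd)).diff PySem.Set.empty).length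
          ≤ (PySem.Set.update (pvU d) (es.map Prod.snd)).length :=
        pv_diff_le_self _ _ hWnd
      have hd2 : (PySem.Set.update (pvU d) (es.map Prod.snd)).length
          ≤ (pvU d).length + (es.map Prod.snd).length := by
        rw [PySem.Set.update_eq_append_filter, List.length_append]
        have := List.length_filter_le (fun y => !(PySem.Set.contains (pvU d) y))
          (PySem.Set.ofList (es.map Prod.snd))
        have h2 := PySem.Set.length_ofList_le (es.map Prod.snd)
        omega
      have h3 : (pvU d).length ≤ (pvUniv d).length := by
        rw [pvU]; exact PySem.Set.length_ofList_le (pvUniv d)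
      have hmul : ((PySem.Set.update (pvU d) (es.map Prod.snd)).diff PySem.Set.empty).length
          * ((pvUniv d).length + 1)
          ≤ ((pvUniv d).length + es.length + 1) * ((pvUniv d).length + 1) := by
        refine Nat.mul_le_mul_right _ ?_
        simp only [List.length_map] at hd2
        omega
      rw [bfsFuel]
      simp only [List.length_reverse, List.length_map]
      omega
    exact bfsLoop_complete d _ _ _ hWnd hWu hst hf e.2 x
      (List.mem_reverse.mpr (List.mem_map_of_mem he)) hr

theorem pv_row (S : PySem.Set Int) (s : Int) (nbrs : List Int) :
    ∀ acc : List (Int × Int),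
    nbrs.foldl (fun a t => if S.contains s || S.contains t then a else a ++ [(s, t)]) acc
      = acc ++ (nbrs.filter (fun t => !(S.contains s) && !(S.contains t))).map (fun t => (s, t)) := by
  induction nbrs with
  | nil => intro acc; simp
  | cons t rest ih =>
      intro acc
      rw [List.foldl_cons]
      by_cases hc : (S.contains s || S.contains t) = true
      · rw [if_pos hc, ih]
        have : (!(S.contains s) && !(S.contains t)) = false := by
          rcases Bool.or_eq_true_iff.mp hc with h | h
          · rw [h, Bool.not_true, Bool.false_and]
          · rw [h, Bool.not_true, Bool.and_false]
        rw [List.filter_cons, this]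
        simp
      · rw [if_neg hc, ih]
        have : (!(S.contains s) && !(S.contains t)) = true := by
          have hc' := eq_false_of_ne_true hc
          rcases Bool.or_eq_false_iff.mp hc' with ⟨hs, ht⟩
          rw [hs, ht, Bool.not_false, Bool.true_and]
        rw [List.filter_cons, this]
        simp

theorem pv_outer (S : PySem.Set Int) (items : List (Int × List Int)) :
    ∀ acc : List (Int × Int),
    items.foldl (fun acc p =>
        p.2.foldl (fun a t => if S.contains p.1 || S.contains t then a else a ++ [(p.1, t)]) acc) acc
      = acc ++ items.flatMap (fun p =>
          (p.2.filter (fun t => !(S.contains p.1) && !(S.contains t))).map (fun t => (p.1, t))) := by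
  induction items with
  | nil => intro acc; simp
  | cons p rest ih =>
      intro acc
      rw [List.foldl_cons, ih, pv_row, List.flatMap_cons, List.append_assoc]

theorem pv_main : ∀ (graph : List (Int × List Int)) (es : List (Int × Int)),
    filter_edges graph es = filter_edges_alt graph es := by
  intro graph es
  simp only [filter_edges, filter_edges_alt]
  have hcont : ∀ z : Int,
      PySem.Set.contains (es.foldl (fun s e => PySem.Set.update (PySem.Set.add s e.2)
        (pyGetDescendants (PySem.Dict.ofList graph) e.2)) PySem.Set.empty) z
      = PySem.Set.contains (bfsLoop (PySem.Dict.ofList graph)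
          (bfsFuel (PySem.Dict.ofList graph) es) ((es.map Prod.snd).reverse) PySem.Set.empty) z := by
    intro z
    rw [Bool.eq_iff_iff, PySem.Set.contains_iff, PySem.Set.contains_iff,
      pv_mem_foldA, pv_mem_exB]
    simp [PySem.Set.empty]
  rw [pv_outer]
  simp only [hcont, List.nil_append]

-- ===== VERDICT (by name: the statement is the Claim_ definition above) =====
theorem filter_edges_spec : Claim_equal_filter_edges := by
  intro graph edges_to_remove _
  unfold Spec_filter_edges
  exact pv_main graph edges_to_remove
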